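-- pv_equiv track=rewrite | github.com/shubhamgbits/leetcode-python | 3. sliding_window/minimum-window-substring.py | check_substring
-- ===== SOURCE A (Python) =====
-- def check_substring(window, char_map):
--     char_map_copy = dict(char_map)
--
--     for char in window:
--         if char in char_map_copy.keys():
--             char_map_copy[char] -= 1
--
--     if max(char_map_copy.values()) > 0:
--         return False
--     else:
--         return True
-- ===== SOURCE B (Python) =====
-- def check_substring(window, char_map):
--     # Per-requirement check: for each required entry, scan the window and
--     # compare its occurrence count against the requirement directly;
--     # no mutable counts and no frequency table are maintained.
--     for c, v in dict(char_map).items():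
--         if sum(ch == c for ch in window) < v:
--             return False
--     return True
-- ===== Notes on version B (the rewrite author's own statement) =====
-- stated objective: alternative
-- what changed: B keeps no counts at all: instead of copying char_map and decrementing it in place during one pass over the window, it loops over the required entries and, for each one, scans the window to compare that key's occurrence count against the requirement (per-key nested scans, early exit on the first unmet requirement).
import Mathlib
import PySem

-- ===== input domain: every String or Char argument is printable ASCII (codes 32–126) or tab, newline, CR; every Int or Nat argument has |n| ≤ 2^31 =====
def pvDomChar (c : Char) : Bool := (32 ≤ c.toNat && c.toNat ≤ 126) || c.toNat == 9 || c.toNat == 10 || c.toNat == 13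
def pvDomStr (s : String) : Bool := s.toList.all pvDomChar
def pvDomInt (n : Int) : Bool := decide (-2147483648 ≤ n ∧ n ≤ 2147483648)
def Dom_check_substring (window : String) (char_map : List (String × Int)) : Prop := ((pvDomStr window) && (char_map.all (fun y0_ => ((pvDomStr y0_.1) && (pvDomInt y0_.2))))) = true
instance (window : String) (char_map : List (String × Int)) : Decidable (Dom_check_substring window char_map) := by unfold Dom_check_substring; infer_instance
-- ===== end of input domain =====

-- B drops the mutable counts entirely: for each required entry it scans the window and compares
-- that key's occurrence count against the requirement (per-key nested scans, alternative decomposition).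


-- ===== PORT A =====
-- char_map_copy = dict(char_map); for char in window: if char in keys: char_map_copy[char] -= 1; return max(values) <= 0
def check_substring (window : String) (char_map : List (String × Int)) : Bool :=
  let init : PySem.Dict String Int := PySem.Dict.ofList char_map
  let final : PySem.Dict String Int :=
    window.toList.foldl (fun d c =>
      let s := String.singleton c
      if d.contains s then d.insert s (d.getD s 0 - 1) else d) init
  match PySem.List.max? final.values (fun y => y) with
  | none => false          -- Python: max() of empty values raises ValueError (excluded by Pre_)
  | some m => if m > 0 then false else true

-- ===== PORT B =====
-- for c, v in dict(char_map).items(): if sum(ch == c for ch in window) < v: return False; return True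
-- (the loop with early 'return False' is the List.all; sum of the booleans 'ch == c' is the countP)
def check_substring_alt (window : String) (char_map : List (String × Int)) : Bool :=
  (PySem.Dict.ofList char_map).items.all (fun p =>
    !(decide (((window.toList.countP (fun ch => String.singleton ch == p.1)) : Int) < p.2)))

-- ===== PRECONDITION & SPEC =====
-- Pre_ excludes only char_map = [], on which A raises ValueError (max of an empty sequence).
def Pre_check_substring (window : String) (char_map : List (String × Int)) : Prop := char_map ≠ []
instance (window : String) (char_map : List (String × Int)) : Decidable (Pre_check_substring window char_map) := by unfold Pre_check_substring; infer_instance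
def pvWitness_check_substring : String × (List (String × Int)) := ("aab", [("a", 2), ("b", 1)])

def Spec_check_substring (window : String) (char_map : List (String × Int)) (out : Bool) : Prop := out = check_substring_alt window char_map
instance (window : String) (char_map : List (String × Int)) (out : Bool) : Decidable (Spec_check_substring window char_map out) := by unfold Spec_check_substring; infer_instance

-- ===== CLAIM (what is proved, stated in full; the proofs are below) =====
def Claim_equal_check_substring : Prop := ∀ (window : String) (char_map : List (String × Int)), Dom_check_substring window char_map → Pre_check_substring window char_map → Spec_check_substring window char_map (check_substring window char_map)
-- ===== LEMMAS AND PROOFS =====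

-- A's decrement loop, characterised: it subtracts from each entry the number of window chars equal to its key.
theorem decLoop_items {ws : List String} {d : PySem.Dict String Int} (hnd : d.keys.Nodup) :
    (ws.foldl (fun d s => if d.contains s then d.insert s (d.getD s 0 - 1) else d) d).items
      = d.items.map (fun p => (p.1, p.2 - (ws.count p.1 : Int))) := by
  induction ws generalizing d with
  | nil => simp
  | cons x t ih =>
    simp only [List.foldl_cons]
    by_cases hc : d.contains x = true
    · have hnd' : (d.insert x (d.getD x 0 - 1)).keys.Nodup := by
        rwa [PySem.Dict.keys_insert_of_contains d _ hc]
      rw [if_pos hc, ih hnd', PySem.Dict.items_insert_of_contains d _ hc, List.map_map]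
      apply List.map_congr_left
      rintro ⟨k, v⟩ hp
      by_cases hx : k = x
      · have hv : d.getD x 0 = v := hx ▸ PySem.Dict.getD_of_mem_items d hp hnd 0
        subst hx
        simp [Function.comp, hv]
        omega
      · simp only [Function.comp]
        rw [if_neg (by simpa using hx)]
        have hx' : x ≠ k := fun h => hx h.symm
        simp [hx']
    · rw [if_neg (by simpa using hc), ih hnd]
      apply List.map_congr_left
      rintro ⟨k, v⟩ hp
      have hx : x ≠ k := by
        intro h
        exact hc (by
          rw [PySem.Dict.contains_iff_mem_keys, h]
          exact PySem.Dict.mem_keys_of_mem_items d hp)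
      simp [hx]

-- iterating the string = iterating its 1-char substrings
theorem decLoop_map (ws : List Char) (d : PySem.Dict String Int) :
    ws.foldl (fun d c =>
        let s := String.singleton c
        if d.contains s then d.insert s (d.getD s 0 - 1) else d) d
      = (ws.map String.singleton).foldl
          (fun d s => if d.contains s then d.insert s (d.getD s 0 - 1) else d) d := by
  rw [List.foldl_map]

-- B's per-key window scan counts exactly what A's loop subtracts at that key.
theorem countP_singleton (ws : List Char) (k : String) :
    ((ws.map String.singleton).count k) = ws.countP (fun ch => String.singleton ch == k) := by
  rw [List.count, List.countP_map]
  rfl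

-- max(vals) ≤ 0 on a nonempty list is 'all entries ≤ 0'.
theorem max_le_iff_all (vals : List Int) (hne : vals ≠ []) :
    (match PySem.List.max? vals (fun y => y) with
     | none => false
     | some m => if m > 0 then false else true)
      = vals.all (fun x => decide (x ≤ 0)) := by
  cases h : PySem.List.max? vals (fun y => y) with
  | none => exact absurd ((PySem.List.max?_eq_none_iff vals (fun y => y)).mp h) hne
  | some m =>
    have hm : m ∈ vals := PySem.List.max?_mem h
    have hmax : ∀ y ∈ vals, y ≤ m := PySem.List.max?_isMax h
    simp only []
    by_cases hp : m > 0
    · rw [if_pos hp]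
      symm
      rw [← Bool.not_eq_true, List.all_eq_true]
      intro hall
      have := hall m hm
      simp at this
      omega
    · rw [if_neg hp]
      symm
      rw [List.all_eq_true]
      intro x hx
      have := hmax x hx
      simp
      omega

-- items of dict(char_map) are nonempty when char_map is.
theorem items_ofList_ne_nil (p : String × Int) (t : List (String × Int)) :
    (PySem.Dict.ofList (p :: t)).items ≠ [] := by
  intro h
  have h1 : p.1 ∈ (PySem.Dict.ofList (p :: t)).keys := by
    show p.1 ∈ ((p :: t).foldl (fun d q => d.insert q.1 q.2) PySem.Dict.empty).keys
    rw [PySem.Dict.keys_foldl_insert_key (key := Prod.fst) (f := fun d q => q.2)]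
    rw [PySem.Dict.keys_empty, PySem.Set.update_nil_left, PySem.Set.mem_ofList]
    simp
  rw [PySem.Dict.keys, h] at h1
  simp at h1

-- ===== VERDICT (by name: the statement is the Claim_ definition above) =====
theorem check_substring_spec : Claim_equal_check_substring := by
  intro window char_map _ hpre
  unfold Spec_check_substring check_substring check_substring_alt
  match char_map with
  | [] => exact absurd rfl hpre
  | p :: t =>
    have hnd : (PySem.Dict.ofList (p :: t)).keys.Nodup := PySem.Dict.nodup_keys_ofList (p :: t)
    simp only [PySem.Dict.values, decLoop_map, decLoop_items hnd, List.map_map]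
    rw [max_le_iff_all _ (by
      intro h
      exact items_ofList_ne_nil p t (List.map_eq_nil_iff.mp h))]
    rw [List.all_map]
    congr 1
    funext q
    simp only [Function.comp]
    simp only [countP_singleton]
    rw [← decide_not, decide_eq_decide]
    omega
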